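-- pv_equiv track=rewrite | github.com/aptripathi68/my-erp-project | procurement/services/bom_mapping.py | detect_column_mapping
-- ===== SOURCE A (Python) =====
-- COLUMN_RULES = {
--     "item_description": ["item", "section", "member", "description"],
--     "grade": ["grade", "material"],
--     "mark_no": ["mark", "mark no"],
--     "item_no": ["item no", "part"],
--     "qty_all": ["qty", "quantity", "nos"],
--     "length": ["length", "len"],
--     "width": ["width"],
--     "thk": ["thk", "thickness"],
--     "unit_wt": ["unit weight", "weight", "wt"]
-- }
--
-- def detect_column_mapping(headers):
--
--     mapping = {}
--
--     for field, keywords in COLUMN_RULES.items():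
--
--         for h in headers:
--
--             h_norm = h.lower()
--
--             if any(k in h_norm for k in keywords):
--                 mapping[field] = h
--                 break
--
--     return mapping
--
-- # def extract_headers(ws, header_row):
--
--     headers = []
--
--     for c in range(1, ws.max_column + 1):
--
--         v = ws.cell(header_row, c).value
--
--         if v:
--             headers.append(str(v).strip())
--
--     return headers
-- ===== SOURCE B (Python) =====
-- COLUMN_RULES = {
--     "item_description": ["item", "section", "member", "description"],
--     "grade": ["grade", "material"],
--     "mark_no": ["mark", "mark no"],
--     "item_no": ["item no", "part"],
--     "qty_all": ["qty", "quantity", "nos"],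
--     "length": ["length", "len"],
--     "width": ["width"],
--     "thk": ["thk", "thickness"],
--     "unit_wt": ["unit weight", "weight", "wt"]
-- }
--
--
-- def detect_column_mapping(headers):
--     # Single pass over headers: each header is lowercased once; a field is
--     # bound to the first header that matches one of its keywords.
--     found = {}
--     for h in headers:
--         hn = h.lower()
--         for field, keywords in COLUMN_RULES.items():
--             if field not in found and any(k in hn for k in keywords):
--                 found[field] = h
--     # emit in canonical field order
--     return {f: found[f] for f in COLUMN_RULES if f in found}
-- ===== Notes on version B (the rewrite author's own statement) =====
-- stated objective: alternative
-- what changed: B makes a single pass over the headers (lowercasing each header once) and, per header, binds every still-unbound field whose keywords match, instead of A's per-field rescan of the whole header list; the result is emitted in canonical field order.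
import Mathlib
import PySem

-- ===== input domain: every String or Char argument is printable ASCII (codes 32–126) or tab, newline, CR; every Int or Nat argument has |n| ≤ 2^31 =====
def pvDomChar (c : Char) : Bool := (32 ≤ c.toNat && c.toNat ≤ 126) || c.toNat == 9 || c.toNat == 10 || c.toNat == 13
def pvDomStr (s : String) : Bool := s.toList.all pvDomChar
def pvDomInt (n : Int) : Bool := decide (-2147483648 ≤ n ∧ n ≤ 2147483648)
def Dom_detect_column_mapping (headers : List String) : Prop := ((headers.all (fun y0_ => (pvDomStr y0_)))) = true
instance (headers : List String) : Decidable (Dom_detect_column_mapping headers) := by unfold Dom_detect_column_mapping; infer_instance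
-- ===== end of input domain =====

-- B makes one pass over the headers (lowercasing each once), binding every still-unbound
-- field per header, instead of A's per-field rescan of the whole header list.

-- COLUMN_RULES, in source order
def columnRules : List (String × List String) :=
  [("item_description", ["item", "section", "member", "description"]),
   ("grade", ["grade", "material"]),
   ("mark_no", ["mark", "mark no"]),
   ("item_no", ["item no", "part"]),
   ("qty_all", ["qty", "quantity", "nos"]),
   ("length", ["length", "len"]),
   ("width", ["width"]),
   ("thk", ["thk", "thickness"]),
   ("unit_wt", ["unit weight", "weight", "wt"])]

-- ===== PORT A =====
-- inner 'for h in headers: … break' loop of A: first header whose lowercase contains a keyword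
def aFindFirst (keywords : List String) : List String → Option String
  | [] => none
  | h :: t =>
      let hNorm := PySem.Str.lower h
      if keywords.any (fun k => PySem.Str.isIn k hNorm) then some h
      else aFindFirst keywords t

def detect_column_mapping (headers : List String) : List (String × String) :=
  (columnRules.foldl (fun (mapping : PySem.Dict String String) p =>
      match aFindFirst p.2 headers with
      | some h => mapping.insert p.1 h
      | none => mapping) PySem.Dict.empty).items

-- ===== PORT B =====
-- B's body of 'for h in headers': try to bind every still-unbound field to h
def bBindHeader (found : PySem.Dict String String) (h : String) : PySem.Dict String String :=
  let hn := PySem.Str.lower h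
  columnRules.foldl (fun d p =>
      if !d.contains p.1 && p.2.any (fun k => PySem.Str.isIn k hn) then d.insert p.1 h
      else d) found

def detect_column_mapping_alt (headers : List String) : List (String × String) :=
  let found := headers.foldl bBindHeader PySem.Dict.empty
  -- final dict comprehension: emit in canonical field order
  columnRules.filterMap (fun p => (found.get? p.1).map (fun h => (p.1, h)))

-- ===== PRECONDITION & SPEC =====
def Spec_detect_column_mapping (headers : List String) (out : List (String × String)) : Prop := out = detect_column_mapping_alt headers
instance (headers : List String) (out : List (String × String)) : Decidable (Spec_detect_column_mapping headers out) := by unfold Spec_detect_column_mapping; infer_instance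

-- ===== CLAIM (what is proved, stated in full; the proofs are below) =====
def Claim_equal_detect_column_mapping : Prop := ∀ (headers : List String), Dom_detect_column_mapping headers → Spec_detect_column_mapping headers (detect_column_mapping headers)

-- ===== LEMMAS AND PROOFS =====

-- A's fold over rules, started from a dict containing none of the remaining fields,
-- appends exactly the filterMap of the first-match results.
lemma a_items (headers : List String) (rs : List (String × List String))
    (m : PySem.Dict String String)
    (hni : ∀ p ∈ rs, m.contains p.1 = false)
    (hnd : (rs.map (·.1)).Nodup) :
    (rs.foldl (fun (mapping : PySem.Dict String String) p =>
        match aFindFirst p.2 headers with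
        | some h => mapping.insert p.1 h
        | none => mapping) m).items
      = m.items ++ rs.filterMap (fun p => (aFindFirst p.2 headers).map (fun h => (p.1, h))) := by
  induction rs generalizing m with
  | nil => simp
  | cons p t ih =>
      simp only [List.map_cons, List.nodup_cons, List.mem_map] at hnd
      simp only [List.foldl_cons, List.filterMap_cons]
      cases hf : aFindFirst p.2 headers with
      | none =>
          rw [ih m (fun q hq => hni q (List.mem_cons_of_mem _ hq)) hnd.2]
          simp
      | some h =>
          rw [ih (m.insert p.1 h) ?_ hnd.2]
          · rw [PySem.Dict.items_insert_of_not_contains m h (hni p (List.mem_cons_self ..))]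
            simp
          · intro q hq
            rw [PySem.Dict.contains_insert]
            have hne : (q.1 == p.1) = false := by
              simp only [beq_eq_false_iff_ne, ne_eq]
              intro he; exact hnd.1 ⟨q, hq, he⟩
            simp [hni q (List.mem_cons_of_mem _ hq), hne]

-- effect of one header on one field's binding, over B's inner fold on a rules sublist
lemma b_inner_get (h : String) (f : String) (rs : List (String × List String))
    (d : PySem.Dict String String)
    (hnd : (rs.map (·.1)).Nodup) :
    ((rs.foldl (fun d p =>
        if !d.contains p.1 && p.2.any (fun k => PySem.Str.isIn k (PySem.Str.lower h)) then d.insert p.1 h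
        else d) d).get? f)
      = match rs.find? (fun p => p.1 == f) with
        | some p => if !d.contains f && p.2.any (fun k => PySem.Str.isIn k (PySem.Str.lower h))
                    then some h else d.get? f
        | none => d.get? f := by
  induction rs generalizing d with
  | nil => simp
  | cons q t ih =>
      simp only [List.map_cons, List.nodup_cons, List.mem_map] at hnd
      have hnf : ∀ g : String, q.1 = g → t.find? (fun p => p.1 == g) = none := by
        intro g hg
        rw [List.find?_eq_none]
        intro p hp
        simp only [beq_iff_eq]
        intro he; exact hnd.1 ⟨p, hp, by rw [he, ← hg]⟩
      simp only [List.foldl_cons, List.find?]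
      by_cases hq : q.1 = f
      · subst hq
        simp only [beq_self_eq_true]
        by_cases hc : (!d.contains q.1 && q.2.any (fun k => PySem.Str.isIn k (PySem.Str.lower h))) = true
        · rw [if_pos hc, ih _ hnd.2, hnf q.1 rfl]
          rw [if_pos hc]
          exact PySem.Dict.get?_insert_self d q.1 h
        · rw [if_neg hc, ih _ hnd.2, hnf q.1 rfl]
          rw [if_neg hc]
      · have hbq : (q.1 == f) = false := by simp [hq]
        rw [hbq]
        by_cases hc : (!d.contains q.1 && q.2.any (fun k => PySem.Str.isIn k (PySem.Str.lower h))) = true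
        · rw [if_pos hc, ih _ hnd.2]
          have hg : (d.insert q.1 h).get? f = d.get? f :=
            PySem.Dict.get?_insert_of_ne d h (fun he : f = q.1 => hq (Eq.symm he))
          have hcc : (d.insert q.1 h).contains f = d.contains f := by
            rw [PySem.Dict.contains_insert]
            have : (f == q.1) = false := by simp only [beq_eq_false_iff_ne, ne_eq]; intro he; exact hq (Eq.symm he)
            simp [this]
          cases t.find? (fun p => p.1 == f) <;> simp [hg, hcc]
        · rw [if_neg hc]
          exact ih _ hnd.2

lemma rules_nodup : (columnRules.map (·.1)).Nodup := by decide

-- B's outer fold computes, for each rule (f, kws), exactly A's first-match result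
lemma b_get (headers : List String) (f : String) (kws : List String)
    (hmem : (f, kws) ∈ columnRules)
    (d : PySem.Dict String String) :
    (headers.foldl bBindHeader d).get? f
      = match d.get? f with
        | some v => some v
        | none => aFindFirst kws headers := by
  induction headers generalizing d with
  | nil => cases hd : d.get? f <;> simp [hd, aFindFirst]
  | cons h t ih =>
      simp only [List.foldl_cons]
      rw [ih]
      have hfind : columnRules.find? (fun p => p.1 == f) = some (f, kws) := by
        have : ∀ (rs : List (String × List String)), (rs.map (·.1)).Nodup → (f, kws) ∈ rs →
            rs.find? (fun p => p.1 == f) = some (f, kws) := by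
          intro rs hnd hm
          induction rs with
          | nil => cases hm
          | cons q t iht =>
              simp only [List.map_cons, List.nodup_cons, List.mem_map] at hnd
              rcases List.mem_cons.mp hm with he | hm'
              · subst he; simp [List.find?]
              · have hq : (q.1 == f) = false := by
                  simp only [beq_eq_false_iff_ne, ne_eq]
                  intro he; exact hnd.1 ⟨(f, kws), hm', Eq.symm he⟩
                simp only [List.find?, hq]
                exact iht hnd.2 hm'
        exact this _ rules_nodup hmem
      unfold bBindHeader
      rw [b_inner_get h f columnRules d rules_nodup, hfind]
      show (match (if (!d.contains f && kws.any fun k => PySem.Str.isIn k (PySem.Str.lower h)) = true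
                   then some h else d.get? f) with
            | some v => some v
            | none => aFindFirst kws t)
          = match d.get? f with
            | some v => some v
            | none => aFindFirst kws (h :: t)
      by_cases hc : d.contains f = true
      · have : (d.get? f).isSome := by rw [← PySem.Dict.contains_eq_isSome_get?, hc]
        obtain ⟨v, hv⟩ := Option.isSome_iff_exists.mp this
        have hcond : (!d.contains f && kws.any fun k => PySem.Str.isIn k (PySem.Str.lower h)) = false := by
          rw [hc]; rfl
        rw [if_neg (by rw [hcond]; exact Bool.false_ne_true), hv]
      · have hc' : d.contains f = false := by simpa using hc
        have hn : d.get? f = none := by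
          have hiso := PySem.Dict.contains_eq_isSome_get? d f
          rw [hc'] at hiso
          exact Option.not_isSome_iff_eq_none.mp (by rw [← hiso]; simp)
        by_cases hk : (kws.any fun k => PySem.Str.isIn k (PySem.Str.lower h)) = true
        · have hcond : (!d.contains f && kws.any fun k => PySem.Str.isIn k (PySem.Str.lower h)) = true := by
            rw [hc', hk]; rfl
          rw [if_pos hcond, hn]
          show some h = aFindFirst kws (h :: t)
          simp only [aFindFirst, hk, if_true]
        · have hk' : (kws.any fun k => PySem.Str.isIn k (PySem.Str.lower h)) = false := by simpa using hk
          have hcond : (!d.contains f && kws.any fun k => PySem.Str.isIn k (PySem.Str.lower h)) = false := by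
            rw [hk']; exact Bool.and_false _
          rw [if_neg (by rw [hcond]; exact Bool.false_ne_true), hn]
          show aFindFirst kws t = aFindFirst kws (h :: t)
          conv_rhs => simp only [aFindFirst]
          rw [if_neg (by rw [hk']; exact Bool.false_ne_true)]

-- ===== VERDICT (by name: the statement is the Claim_ definition above) =====
theorem detect_column_mapping_spec : Claim_equal_detect_column_mapping := by
  intro headers _
  unfold Spec_detect_column_mapping detect_column_mapping detect_column_mapping_alt
  rw [a_items headers columnRules PySem.Dict.empty (by intro p _; simp) rules_nodup]
  simp only [PySem.Dict.empty, List.nil_append]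
  refine (List.filterMap_congr ?_).symm
  intro p hp
  rw [b_get headers p.1 p.2 (by simpa using hp)]
  rfl
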